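-- pv_equiv track=rewrite | github.com/mu5dvlp/quantum-rendering-unity | Assets/MU5/QuantumRendering/Scripts/python/common_logic.py | gray_code_2d
-- ===== SOURCE A (Python) =====
-- def gray_code(n):
--     """nビットのグレイコードを生成する関数"""
--     if n == 0:
--         return ['']
--     smaller_gray_code = gray_code(n - 1)
--     return ['0' + code for code in smaller_gray_code] + ['1' + code for code in reversed(smaller_gray_code)]
--
-- def gray_code_2d(w, h):
--     """w x h の2次元グレイコードを生成する関数"""
--     log2_w = (w-1).bit_length()
--     log2_h = (h-1).bit_length()
--
--     # グレイコードの生成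
--     gray_codes_x = gray_code(log2_w)
--     gray_codes_y = gray_code(log2_h)
--
--     # 結果を保存する配列
--     gray_code_matrix = [['' for _ in range(w)] for _ in range(h)]
--
--     for y in range(0,h):
--         for x in range(0,w):
--             s_xy = gray_codes_x[x] + gray_codes_y[y]
--             gray_code_matrix[y][x] = s_xy
--
--     return gray_code_matrix
-- ===== SOURCE B (Python) =====
-- def gray_code_2d(w, h):
--     """w x h の2次元グレイコードを生成する関数"""
--     width_w = (w - 1).bit_length()
--     width_h = (h - 1).bit_length()
--
--     def cell(i, width):
--         # closed-form Gray code: i ^ (i >> 1), zero-padded binary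
--         return format(i ^ (i >> 1), '0{}b'.format(width)) if width else ''
--
--     cols = [cell(x, width_w) for x in range(w)]
--     rows = [cell(y, width_h) for y in range(h)]
--     return [[cx + ry for cx in cols] for ry in rows]
-- ===== Notes on version B (the rewrite author's own statement) =====
-- stated objective: simpler
-- what changed: Replaces the recursive reflected Gray-code table and the mutate-in-place matrix fill with a per-cell closed form i ^ (i >> 1) formatted as zero-padded binary inside a nested comprehension.
import Mathlib
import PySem

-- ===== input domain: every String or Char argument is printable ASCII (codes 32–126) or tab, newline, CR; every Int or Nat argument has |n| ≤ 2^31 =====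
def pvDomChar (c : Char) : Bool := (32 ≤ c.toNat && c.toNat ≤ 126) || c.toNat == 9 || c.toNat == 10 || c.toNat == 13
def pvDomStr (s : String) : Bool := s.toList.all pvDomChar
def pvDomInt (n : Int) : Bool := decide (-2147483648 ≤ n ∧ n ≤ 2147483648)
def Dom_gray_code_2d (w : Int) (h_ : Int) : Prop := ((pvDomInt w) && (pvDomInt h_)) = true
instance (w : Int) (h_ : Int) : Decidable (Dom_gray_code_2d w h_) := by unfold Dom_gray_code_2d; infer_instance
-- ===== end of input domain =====

-- B replaces the recursive reflected Gray-code table and the mutate-in-place matrix fill of A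
-- with a per-cell closed form i ^ (i >> 1) formatted as zero-padded binary (objective: simpler).


-- ===== PORT A =====
-- helper gray_code(n): the reflected recursion, strings as List Char (convention: String ↔ List Char)
def grayCode : Nat → List (List Char)
  | 0 => [[]]
  | n + 1 =>
    let smaller := grayCode n
    smaller.map (fun code => '0' :: code) ++ (smaller.reverse.map (fun code => '1' :: code))

-- gray_codes_x[x] / gray_codes_y[y] are always in range (x < w ≤ 2^bitLength(w-1)), so pyGetD is exact here
def gray_code_2d (w : Int) (h_ : Int) : List (List String) :=
  let log2_w := PySem.Int.bitLength (w - 1)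
  let log2_h := PySem.Int.bitLength (h_ - 1)
  let gray_codes_x := grayCode log2_w
  let gray_codes_y := grayCode log2_h
  let matrix0 := (PySem.List.pyRange 0 h_ 1).map (fun _ => (PySem.List.pyRange 0 w 1).map (fun _ => ""))
  (PySem.List.pyRange 0 h_ 1).foldl (fun m y =>
    (PySem.List.pyRange 0 w 1).foldl (fun m x =>
      PySem.List.pySetD m y (PySem.List.pySetD (PySem.List.pyGetD m y []) x
        (String.ofList (PySem.List.pyGetD gray_codes_x x [] ++ PySem.List.pyGetD gray_codes_y y [])))) m) matrix0

-- ===== PORT B =====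
-- port of B's cell(i, width): format(i ^ (i >> 1), '0{width}b') if width else ''
-- (the format port is exact for 0 ≤ value < 2^width, which always holds here since 0 ≤ i < 2^width)
def cellChars (i : Int) (width : Nat) : List Char :=
  if width = 0 then []
  else (List.range width).reverse.map
    (fun k => if (PySem.Int.bxor i (i >>> (1 : Nat))).toNat.testBit k then '1' else '0')

def gray_code_2d_alt (w : Int) (h_ : Int) : List (List String) :=
  let width_w := PySem.Int.bitLength (w - 1)
  let width_h := PySem.Int.bitLength (h_ - 1)
  let cols := (PySem.List.pyRange 0 w 1).map (fun x => cellChars x width_w)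
  let rows := (PySem.List.pyRange 0 h_ 1).map (fun y => cellChars y width_h)
  rows.map (fun ry => cols.map (fun cx => String.ofList (cx ++ ry)))

-- ===== PRECONDITION & SPEC =====
def Spec_gray_code_2d (w : Int) (h_ : Int) (out : List (List String)) : Prop := out = gray_code_2d_alt w h_
instance (w : Int) (h_ : Int) (out : List (List String)) : Decidable (Spec_gray_code_2d w h_ out) := by unfold Spec_gray_code_2d; infer_instance

-- ===== CLAIM (what is proved, stated in full; the proofs are below) =====
def Claim_equal_gray_code_2d : Prop := ∀ (w : Int) (h_ : Int), Dom_gray_code_2d w h_ → Spec_gray_code_2d w h_ (gray_code_2d w h_)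

-- ===== LEMMAS AND PROOFS =====

/-- Gray value of `k` on the Nat side. -/
def gn (k : Nat) : Nat := k ^^^ (k >>> 1)

/-- `m` printed in binary, zero-padded to exactly `n` digits (MSB first); proof-side normal form. -/
def padBin (m n : Nat) : List Char := (List.range n).reverse.map (fun k => if m.testBit k then '1' else '0')

theorem padBin_succ (m n : Nat) :
    padBin m (n + 1) = (if m.testBit n then '1' else '0') :: padBin m n := by
  simp [padBin, List.range_succ]

theorem gn_lt {k n : Nat} (h : k < 2 ^ n) : gn k < 2 ^ n := by
  refine Nat.xor_lt_two_pow h (lt_of_le_of_lt ?_ h)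
  simpa [Nat.shiftRight_one] using Nat.div_le_self k 2

theorem padBin_congr_of_low {a b n : Nat} (h : ∀ k < n, a.testBit k = b.testBit k) :
    padBin a n = padBin b n := by
  unfold padBin
  refine List.map_congr_left ?_
  intro k hk
  rw [h k (by simpa using List.mem_reverse.mp hk)]

theorem gn_reflect {n j : Nat} (hj : j < 2 ^ n) :
    gn (2 ^ n + j) = 2 ^ n + gn (2 ^ n - 1 - j) := by
  have hpos : 0 < 2 ^ n := Nat.two_pow_pos n
  have hm : 2 ^ n - 1 - j = 2 ^ n - (j + 1) := by omega
  rw [hm]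
  obtain ⟨r, hrlt, hrdef⟩ : ∃ r, r < 2 ^ n ∧ gn (2 ^ n - (j + 1)) = r :=
    ⟨_, gn_lt (by omega), rfl⟩
  have hhigh : ∀ (x i' : Nat), x < 2 ^ n → n < i' → (2 ^ n + x).testBit i' = false := by
    intro x i' hx hi'
    apply Nat.testBit_eq_false_of_lt
    calc 2 ^ n + x < 2 ^ n + 2 ^ n := by omega
    _ = 2 ^ (n + 1) := by ring
    _ ≤ 2 ^ i' := Nat.pow_le_pow_right (by norm_num) (by omega)
  have hrbit : ∀ k, r.testBit k =
      (((decide (k < n)) && !j.testBit k) ^^ ((decide (1 + k < n)) && !j.testBit (1 + k))) := by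
    intro k
    rw [← hrdef]
    simp only [gn, Nat.testBit_xor, Nat.testBit_shiftRight]
    rw [Nat.testBit_two_pow_sub_succ hj k, Nat.testBit_two_pow_sub_succ hj (1 + k)]
  apply Nat.eq_of_testBit_eq
  intro i
  rw [hrdef]
  simp only [gn, Nat.testBit_xor, Nat.testBit_shiftRight]
  rcases lt_trichotomy i n with hi | hi | hi
  · rw [Nat.testBit_two_pow_add_gt hi]
    rcases Nat.lt_or_ge (1 + i) n with hin | hin
    · rw [Nat.testBit_two_pow_add_gt hin, Nat.testBit_two_pow_add_gt hi, hrbit i]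
      simp only [hi, hin, decide_true, Bool.true_and]
      cases j.testBit i <;> cases j.testBit (1 + i) <;> rfl
    · have hn : 1 + i = n := by omega
      rw [hn, Nat.testBit_two_pow_add_eq, Nat.testBit_two_pow_add_gt hi, hrbit i,
          Nat.testBit_lt_two_pow hj]
      simp only [hi, decide_true, Bool.true_and, hn, show ¬ (n < n) by omega, decide_false,
        Bool.false_and]
      cases j.testBit i <;> rfl
  · subst hi
    rw [Nat.testBit_two_pow_add_eq, Nat.testBit_two_pow_add_eq,
        Nat.testBit_lt_two_pow hj, Nat.testBit_lt_two_pow hrlt, hhigh j (1 + i) hj (by omega)]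
    rfl
  · rw [hhigh j i hj hi, hhigh j (1 + i) hj (by omega), hhigh r i hrlt hi]
    rfl

theorem range_reverse (n : Nat) : (List.range n).reverse = (List.range n).map (fun k => n - 1 - k) := by
  apply List.ext_getElem <;> simp [List.getElem_reverse]

/-- A's recursive table IS the closed form, padded to width `n`. -/
theorem grayCode_eq (n : Nat) : grayCode n = (List.range (2 ^ n)).map (fun k => padBin (gn k) n) := by
  induction n with
  | zero => simp [grayCode, padBin]
  | succ n ih =>
    rw [grayCode]
    simp only [ih]
    rw [show 2 ^ (n + 1) = 2 ^ n + 2 ^ n by ring, List.range_add, List.map_append]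
    congr 1
    · rw [List.map_map]
      refine List.map_congr_left ?_
      intro k hk
      have hk' : k < 2 ^ n := List.mem_range.mp hk
      have hb : (gn k).testBit n = false := Nat.testBit_lt_two_pow (gn_lt hk')
      simp only [Function.comp_apply, padBin_succ, hb]
      rfl
    · rw [← List.map_reverse, range_reverse, List.map_map, List.map_map, List.map_map]
      refine List.map_congr_left ?_
      intro j hj
      have hj' : j < 2 ^ n := List.mem_range.mp hj
      have hpos : 0 < 2 ^ n := Nat.two_pow_pos n
      have hr : gn (2 ^ n - 1 - j) < 2 ^ n := gn_lt (by omega)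
      have hbit : (2 ^ n + gn (2 ^ n - 1 - j)).testBit n = true := by
        rw [Nat.testBit_two_pow_add_eq, Nat.testBit_lt_two_pow hr]
        rfl
      simp only [Function.comp_apply]
      rw [gn_reflect hj', padBin_succ, hbit]
      congr 1
      exact padBin_congr_of_low (fun k hk => (Nat.testBit_two_pow_add_gt hk _).symm)

theorem fillRow_eq (g : Nat → String) (r : List String) (k : Nat) (h : k ≤ r.length) :
    (List.range k).foldl (fun r x => r.set x (g x)) r = (List.range k).map g ++ r.drop k := by
  induction k with
  | zero => simp
  | succ k ih =>
    rw [List.range_succ, List.foldl_append, ih (by omega)]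
    simp only [List.foldl_cons, List.foldl_nil]
    rw [List.set_append]
    have hlen : (List.map g (List.range k)).length = k := by simp
    rw [hlen, if_neg (by omega), Nat.sub_self]
    have hdrop : (List.drop k r).set 0 (g k) = g k :: List.drop (k + 1) r := by
      rw [List.drop_eq_getElem_cons (by omega : k < r.length)]
      rfl
    rw [hdrop]
    simp

theorem innerFold_eq (l : List Nat) (y : Nat) (g : Nat → String) :
    ∀ (m : List (List String)), y < m.length →
      l.foldl (fun m x => m.set y ((m.getD y []).set x (g x))) m
        = m.set y (l.foldl (fun r x => r.set x (g x)) (m.getD y [])) := by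
  induction l with
  | nil =>
    intro m hy
    rw [List.foldl_nil, List.foldl_nil, List.getD_eq_getElem _ _ hy]
    simp
  | cons x l ih =>
    intro m hy
    simp only [List.foldl_cons]
    rw [ih _ (by simpa using hy), List.set_set]
    congr 2
    rw [List.getD_eq_getElem _ _ (by simpa using hy)]
    simp

theorem fillMatrix (f : Nat → Nat → String) (H W : Nat) :
    (List.range H).foldl
        (fun m y => (List.range W).foldl (fun m x => m.set y ((m.getD y []).set x (f x y))) m)
        (List.replicate H (List.replicate W ""))
      = (List.range H).map (fun y => (List.range W).map (fun x => f x y)) := by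
  suffices h : ∀ k, k ≤ H →
      (List.range k).foldl
          (fun m y => (List.range W).foldl (fun m x => m.set y ((m.getD y []).set x (f x y))) m)
          (List.replicate H (List.replicate W ""))
        = (List.range k).map (fun y => (List.range W).map (fun x => f x y))
            ++ List.replicate (H - k) (List.replicate W "") by
    simpa using h H le_rfl
  intro k hk
  induction k with
  | zero => simp
  | succ k ih =>
    rw [List.range_succ, List.foldl_append, ih (by omega)]
    simp only [List.foldl_cons, List.foldl_nil]
    have hAlen : ((List.range k).map (fun y => (List.range W).map (fun x => f x y))).length = k := by
      simp
    have hHk : H - k = (H - (k + 1)) + 1 := by omega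
    rw [hHk, List.replicate_succ]
    rw [innerFold_eq (List.range W) k (fun x => f x k) _ (by simp)]
    have hget : ((List.range k).map (fun y => (List.range W).map (fun x => f x y))
        ++ List.replicate W "" :: List.replicate (H - (k + 1)) (List.replicate W "")).getD k []
        = List.replicate W "" := by
      rw [List.getD_eq_getElem _ _ (by simp), List.getElem_append_right (by omega)]
      simp [hAlen]
    rw [hget, fillRow_eq (fun x => f x k) _ W (by simp)]
    rw [List.set_append, hAlen, if_neg (by omega), Nat.sub_self]
    simp

-- the in-range index bound: x < w ⇒ x < 2 ^ bit_length(w - 1)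
theorem lt_two_pow_bitLength_sub_one {w : Int} {k : Nat} (hk : k < w.toNat) :
    k < 2 ^ PySem.Int.bitLength (w - 1) := by
  have h := PySem.Int.lt_two_pow_bitLength (w - 1)
  omega

/-- one cell: A's table entry is B's closed-form cell. -/
theorem cell_eq (n : Nat) (k : Nat) (hk : k < 2 ^ n) :
    (grayCode n).getD k [] = cellChars (↑k) n := by
  rw [grayCode_eq, List.getD_eq_getElem _ _ (by simpa using hk)]
  simp only [List.getElem_map, List.getElem_range]
  by_cases hn : n = 0
  · subst hn
    have hk0 : k = 0 := by omega
    subst hk0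
    rfl
  · unfold cellChars
    rw [if_neg hn]
    have hcast : ((k : Int) >>> (1 : Nat)) = ((k >>> 1 : Nat) : Int) := rfl
    rw [hcast, PySem.Int.bxor_natCast, Int.toNat_natCast]
    simp [padBin, gn]

-- ===== VERDICT (by name: the statement is the Claim_ definition above) =====
theorem gray_code_2d_spec : Claim_equal_gray_code_2d := by
  unfold Claim_equal_gray_code_2d Spec_gray_code_2d
  intro w h_ _
  unfold gray_code_2d gray_code_2d_alt
  simp only [PySem.List.pyRange_one, zero_add, sub_zero, List.foldl_map, List.map_map,
    PySem.List.pySetD_natCast, PySem.List.pyGetD_natCast, Function.comp_def,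
    List.map_const', List.length_range]
  rw [fillMatrix (fun xk yk => String.ofList
      ((grayCode (PySem.Int.bitLength (w - 1))).getD xk []
        ++ (grayCode (PySem.Int.bitLength (h_ - 1))).getD yk [])) h_.toNat w.toNat]
  refine List.map_congr_left ?_
  intro yk hyk
  refine List.map_congr_left ?_
  intro xk hxk
  rw [cell_eq _ xk (lt_two_pow_bitLength_sub_one (List.mem_range.mp hxk)),
      cell_eq _ yk (lt_two_pow_bitLength_sub_one (List.mem_range.mp hyk))]
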